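-- pv_equiv track=rewrite | github.com/Newtoun/Aed2-ufam | python/admin/lucas.py | heuristica
-- ===== SOURCE A (Python) =====
-- def valorRoda(config, roda):
-- 	return (config // 10 ** (4 - roda)) % 10
--
-- def heuristica(numero):
-- 	a, b, c, d= valorRoda(numero, 1), valorRoda(numero, 2), valorRoda(numero, 3), valorRoda(numero, 4)
-- 	lista=[a,b,c,d]
-- 	helristica=0
-- 	for i in lista:
-- 		if i >=5:
-- 			i = 10 - i
-- 		helristica+=i
-- 	return helristica
-- ===== SOURCE B (Python) =====
-- _DIST = (0, 1, 2, 3, 4, 5, 4, 3, 2, 1)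
--
-- def heuristica(numero):
--     s = str(numero % 10000)
--     s = "0" * (4 - len(s)) + s
--     total = 0
--     for ch in s:
--         total += _DIST[ord(ch) - 48]
--     return total
-- ===== Notes on version B (the rewrite author's own statement) =====
-- stated objective: alternative
-- what changed: Replaces the valorRoda power-of-ten division cascade, the intermediate list and the min/branch with a different algorithm: normalize with numero % 10000, render it as a zero-padded 4-character decimal string, and sum per-character lookups in a precomputed distance table.
import Mathlib
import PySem

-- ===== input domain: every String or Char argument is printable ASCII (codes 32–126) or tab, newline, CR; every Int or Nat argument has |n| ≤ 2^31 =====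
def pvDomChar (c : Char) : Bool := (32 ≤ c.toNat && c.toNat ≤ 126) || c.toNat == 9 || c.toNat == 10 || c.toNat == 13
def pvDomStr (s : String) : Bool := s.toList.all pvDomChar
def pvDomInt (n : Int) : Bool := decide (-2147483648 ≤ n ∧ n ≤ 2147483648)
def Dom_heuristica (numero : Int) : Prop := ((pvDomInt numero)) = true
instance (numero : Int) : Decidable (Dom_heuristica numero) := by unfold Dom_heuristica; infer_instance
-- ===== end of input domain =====

-- B replaces the positional division cascade and the min/branch with a different algorithm:
-- it renders numero % 10000 as a zero-padded 4-character decimal string and sums per-character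
-- lookups in a precomputed distance table (objective: alternative, same O(1) cost).

-- ===== PORT A =====
-- (config // 10 ** (4 - roda)) % 10 ; only called with roda = 1..4, so the exponent is nonnegative
def valorRoda (config roda : Int) : Int :=
  PySem.Int.mod (PySem.Int.floordiv config ((10 : Int) ^ (4 - roda).toNat)) 10

def heuristica (numero : Int) : Int :=
  let a := valorRoda numero 1
  let b := valorRoda numero 2
  let c := valorRoda numero 3
  let d := valorRoda numero 4
  let lista := [a, b, c, d]
  lista.foldl (fun helristica i => helristica + (if i ≥ 5 then 10 - i else i)) 0

-- ===== PORT B =====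
def distTable : List Int := [0, 1, 2, 3, 4, 5, 4, 3, 2, 1]

-- s = str(numero % 10000); s = "0" * (4 - len(s)) + s; total += _DIST[ord(ch) - 48] per ch.
-- The index ord(ch) - 48 is always 0..9 here (decimal digits of a nonnegative number), so
-- Python's _DIST[...] never raises; pyGet? … |>.getD 0 is value-equal on this file's inputs.
def heuristica_alt (numero : Int) : Int :=
  let s := (PySem.Int.toStr (PySem.Int.mod numero 10000)).toList
  let padded := List.replicate (4 - s.length) '0' ++ s
  padded.foldl
    (fun total ch => total + (PySem.List.pyGet? distTable ((ch.toNat : Int) - 48)).getD 0) 0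

-- ===== PRECONDITION & SPEC =====
def Spec_heuristica (numero : Int) (out : Int) : Prop := out = heuristica_alt numero
instance (numero : Int) (out : Int) : Decidable (Spec_heuristica numero out) := by
  unfold Spec_heuristica; infer_instance

-- ===== CLAIM =====
def Claim_equal_heuristica : Prop :=
  ∀ (numero : Int), Dom_heuristica numero → Spec_heuristica numero (heuristica numero)

-- ===== LEMMAS AND PROOFS =====

-- one unfolding step of Nat.toDigitsCore at base 10
theorem tdc_succ (f n : Nat) (ds : List Char) :
    Nat.toDigitsCore 10 (f + 1) n ds =
      if n / 10 = 0 then (n % 10).digitChar :: ds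
      else Nat.toDigitsCore 10 f (n / 10) ((n % 10).digitChar :: ds) := by
  simp [Nat.toDigitsCore]

-- the fuel is irrelevant as long as it exceeds n
theorem tdc_fuel (n : Nat) : ∀ (f₁ f₂ : Nat) (ds : List Char), n < f₁ → n < f₂ →
    Nat.toDigitsCore 10 f₁ n ds = Nat.toDigitsCore 10 f₂ n ds := by
  induction n using Nat.strong_induction_on with
  | _ n ih =>
    intro f₁ f₂ ds h₁ h₂
    obtain ⟨g₁, rfl⟩ : ∃ g, f₁ = g + 1 := ⟨f₁ - 1, by omega⟩
    obtain ⟨g₂, rfl⟩ : ∃ g, f₂ = g + 1 := ⟨f₂ - 1, by omega⟩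
    rw [tdc_succ, tdc_succ]
    by_cases h : n / 10 = 0
    · simp [h]
    · simp only [h, if_false]
      exact ih (n / 10) (by omega) g₁ g₂ _ (by omega) (by omega)

-- the zero-padded digit string of m < 10000 is exactly the four decimal digits
theorem padded_chars (m : Nat) (hm : m < 10000) :
    List.replicate (4 - (Nat.toDigits 10 m).length) '0' ++ Nat.toDigits 10 m =
      [(m / 1000 % 10).digitChar, (m / 100 % 10).digitChar,
       (m / 10 % 10).digitChar, (m % 10).digitChar] := by
  have step : ∀ (k : Nat) (ds : List Char), Nat.toDigitsCore 10 (k + 1) k ds =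
      if k / 10 = 0 then (k % 10).digitChar :: ds
      else Nat.toDigitsCore 10 (k / 10 + 1) (k / 10) ((k % 10).digitChar :: ds) := by
    intro k ds
    rw [tdc_succ]
    by_cases h : k / 10 = 0
    · simp [h]
    · simp only [h, if_false]
      exact tdc_fuel (k / 10) k (k / 10 + 1) _ (by omega) (by omega)
  unfold Nat.toDigits
  by_cases h1 : m < 10
  · rw [step]
    simp only [show m / 10 = 0 by omega, if_true]
    have e0 : m / 1000 % 10 = 0 := by omega
    have e1 : m / 100 % 10 = 0 := by omega
    have e2 : m / 10 % 10 = 0 := by omega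
    simp [e0, e1, e2, Nat.digitChar, List.replicate]
  · by_cases h2 : m < 100
    · rw [step]
      simp only [show ¬ (m / 10 = 0) by omega, if_false]
      rw [step]
      simp only [show m / 10 / 10 = 0 by omega, if_true]
      have e0 : m / 1000 % 10 = 0 := by omega
      have e1 : m / 100 % 10 = 0 := by omega
      simp [e0, e1, Nat.digitChar, List.replicate]
    · by_cases h3 : m < 1000
      · rw [step]
        simp only [show ¬ (m / 10 = 0) by omega, if_false]
        rw [step]
        simp only [show ¬ (m / 10 / 10 = 0) by omega, if_false]
        rw [step]
        simp only [show m / 10 / 10 / 10 = 0 by omega, if_true]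
        have e0 : m / 1000 % 10 = 0 := by omega
        have e3 : m / 10 / 10 = m / 100 := by omega
        simp [e0, e3, Nat.digitChar]
      · rw [step]
        simp only [show ¬ (m / 10 = 0) by omega, if_false]
        rw [step]
        simp only [show ¬ (m / 10 / 10 = 0) by omega, if_false]
        rw [step]
        simp only [show ¬ (m / 10 / 10 / 10 = 0) by omega, if_false]
        rw [step]
        simp only [show m / 10 / 10 / 10 / 10 = 0 by omega, if_true]
        have e1 : m / 10 / 10 / 10 % 10 = m / 1000 % 10 := by omega
        have e2 : m / 10 / 10 % 10 = m / 100 % 10 := by omega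
        simp [e1, e2]

-- table lookup at a digit character equals A's branch value
theorem table_val (d : Nat) (hd : d < 10) :
    (PySem.List.pyGet? distTable (((Nat.digitChar d).toNat : Int) - 48)).getD 0 =
      (if (d : Int) ≥ 5 then 10 - (d : Int) else (d : Int)) := by
  interval_cases d <;> decide

theorem heuristica_eq_alt (numero : Int) : heuristica numero = heuristica_alt numero := by
  obtain ⟨m, hm1, hmlt⟩ :
      ∃ m : Nat, numero % 10000 = (m : Int) ∧ m < 10000 :=
    ⟨(numero % 10000).toNat, by omega, by omega⟩
  have hmod : PySem.Int.mod numero 10000 = (m : Int) := by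
    rw [PySem.Int.mod_eq_emod_of_pos (by norm_num)]; exact hm1
  -- B side
  have hB : heuristica_alt numero =
      (if ((m / 1000 % 10 : Nat) : Int) ≥ 5 then 10 - ((m / 1000 % 10 : Nat) : Int) else ((m / 1000 % 10 : Nat) : Int)) +
      (if ((m / 100 % 10 : Nat) : Int) ≥ 5 then 10 - ((m / 100 % 10 : Nat) : Int) else ((m / 100 % 10 : Nat) : Int)) +
      (if ((m / 10 % 10 : Nat) : Int) ≥ 5 then 10 - ((m / 10 % 10 : Nat) : Int) else ((m / 10 % 10 : Nat) : Int)) +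
      (if ((m % 10 : Nat) : Int) ≥ 5 then 10 - ((m % 10 : Nat) : Int) else ((m % 10 : Nat) : Int)) := by
    unfold heuristica_alt
    rw [hmod]
    have htc : (PySem.Int.toStr (m : Int)).toList = Nat.toDigits 10 m := by
      rw [PySem.Int.toList_toStr]
      simp [PySem.Int.toChars, show ¬ ((m : Int) < 0) by omega]
    simp only [htc, padded_chars m hmlt, List.foldl]
    rw [table_val _ (by omega), table_val _ (by omega), table_val _ (by omega),
        table_val _ (by omega)]
    split_ifs <;> ring
  -- A side: the four positional digits of numero equal the digits of m = numero % 10000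
  have d3 : numero / 1000 % 10 = ((m / 1000 % 10 : Nat) : Int) := by omega
  have d2 : numero / 100 % 10 = ((m / 100 % 10 : Nat) : Int) := by omega
  have d1 : numero / 10 % 10 = ((m / 10 % 10 : Nat) : Int) := by omega
  have d0 : numero / 1 % 10 = ((m % 10 : Nat) : Int) := by omega
  unfold heuristica valorRoda
  simp only [List.foldl,
    show ((4:Int)-1).toNat = 3 from rfl, show ((4:Int)-2).toNat = 2 from rfl,
    show ((4:Int)-3).toNat = 1 from rfl, show ((4:Int)-4).toNat = 0 from rfl,
    show (10:Int)^3 = 1000 from by norm_num, show (10:Int)^2 = 100 from by norm_num,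
    show (10:Int)^1 = 10 from by norm_num, show (10:Int)^0 = 1 from by norm_num,
    PySem.Int.mod_eq_emod_of_pos (show (0:Int) < 10 by norm_num),
    PySem.Int.floordiv_eq_ediv_of_pos (show (0:Int) < 1 by norm_num),
    PySem.Int.floordiv_eq_ediv_of_pos (show (0:Int) < 10 by norm_num),
    PySem.Int.floordiv_eq_ediv_of_pos (show (0:Int) < 100 by norm_num),
    PySem.Int.floordiv_eq_ediv_of_pos (show (0:Int) < 1000 by norm_num)]
  rw [d3, d2, d1, d0, hB]
  split_ifs <;> ring

-- ===== VERDICT =====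
theorem heuristica_spec : Claim_equal_heuristica := by
  intro numero _
  exact heuristica_eq_alt numero
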